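-- pv_equiv track=rewrite | github.com/reedcwilson/exercises | python/book-store/book_store.py | get_scenarios
-- ===== SOURCE A (Python) =====
-- def take(n, books):
--     lst = []
--     for i in range(len(books)):
--         if len(lst) == n:
--             break
--         if books[i] == 0:
--             continue
--         lst.append(True)
--         books[i] -= 1
--     return lst
--
-- def get_scenarios(book_nums):
--     scenarios = []
--     for group_size in range(1, len(book_nums) + 1):
--         scenario = []
--         books = book_nums[:]
--         while True:
--             group = take(group_size, books)
--             if not group:
--                 break
--             scenario.append(group)
--         scenarios.append(scenario)
--     return scenarios
-- ===== SOURCE B (Python) =====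
-- def get_scenarios(book_nums):
--     scenarios = []
--     for group_size in range(1, len(book_nums) + 1):
--         active = [b for b in book_nums if b != 0]
--         scenario = []
--         while active:
--             m = min(group_size, len(active))
--             scenario.append([True] * m)
--             head = [b - 1 for b in active[:m]]
--             active = [b for b in head if b != 0] + active[m:]
--         scenarios.append(scenario)
--     return scenarios
-- ===== Notes on version B (the rewrite author's own statement) =====
-- stated objective: alternative
-- what changed: B drops the take() helper with its zero-skipping index scan and instead keeps only the still-nonzero counts in a compacted list, emitting [True]*min(group_size,len(active)) per round and removing exhausted books immediately.
import Mathlib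
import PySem

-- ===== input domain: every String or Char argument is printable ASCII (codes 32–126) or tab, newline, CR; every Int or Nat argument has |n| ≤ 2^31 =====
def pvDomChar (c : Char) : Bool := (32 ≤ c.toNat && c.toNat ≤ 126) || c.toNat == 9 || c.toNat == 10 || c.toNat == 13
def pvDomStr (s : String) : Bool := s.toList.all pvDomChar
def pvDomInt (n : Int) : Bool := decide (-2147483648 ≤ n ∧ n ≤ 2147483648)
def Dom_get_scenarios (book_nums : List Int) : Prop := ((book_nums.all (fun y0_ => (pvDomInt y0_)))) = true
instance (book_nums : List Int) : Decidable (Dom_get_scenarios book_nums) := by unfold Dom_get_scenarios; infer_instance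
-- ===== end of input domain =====

-- B replaces the zero-skipping take() scan with a compacted list of still-nonzero counts,
-- emitting each group directly and dropping exhausted books (objective: alternative; avoids rescanning exhausted books).

-- ===== PORT A =====
-- take(n, books): Python iterates i over range(len(books)) mutating books[i]; ported as
-- structural recursion over the list, returning (lst, updated books) — exact step for step.
def takeAux (n : Int) (lst : List Bool) : List Int → (List Bool × List Int)
  | [] => (lst, [])
  | b :: rest =>
    if (lst.length : Int) = n then (lst, b :: rest)
    else if b = 0 then
      let r := takeAux n lst rest
      (r.1, b :: r.2)
    else
      let r := takeAux n (lst ++ [true]) rest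
      (r.1, (b - 1) :: r.2)

-- Fuel for the unbounded 'while True' loop: when every count is nonnegative the loop makes
-- at most (sum of counts) productive rounds, so this fuel is never exhausted on Pre_ inputs;
-- on a negative count the Python loops forever (excluded by Pre_ below).
def pvFuel (books : List Int) : Nat := books.foldl (fun a b => a + b.toNat) 0 + 1

def whileLoopA (gs : Int) : Nat → List (List Bool) → List Int → List (List Bool)
  | 0, scenario, _ => scenario
  | fuel + 1, scenario, books =>
    let r := takeAux gs [] books
    if r.1 = [] then scenario
    else whileLoopA gs fuel (scenario ++ [r.1]) r.2

def get_scenarios (book_nums : List Int) : List (List (List Bool)) :=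
  (PySem.List.pyRange 1 ((book_nums.length : Int) + 1) 1).foldl
    (fun scenarios gs => scenarios ++ [whileLoopA gs (pvFuel book_nums) [] book_nums]) []

-- ===== PORT B =====
-- while active: one round emits [True]*m and rebuilds the compacted list; same fuel guard
-- for totality (B's Python while-loop is also unbounded on negative counts).
-- m ≥ 0 always holds here, so active[:m] / active[m:] are List.take/drop (exact) and
-- [True]*m is List.replicate m.toNat true (exact: Python clamps negative repeats to 0).
-- 'b != 0' from B's comprehensions, as one named Bool predicate.
def nz (b : Int) : Bool := b != 0

def altLoop (gs : Int) : Nat → List (List Bool) → List Int → List (List Bool)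
  | 0, scenario, _ => scenario
  | fuel + 1, scenario, active =>
    if active = [] then scenario
    else
      let m := min gs (active.length : Int)
      let head := (active.take m.toNat).map (· - 1)
      altLoop gs fuel (scenario ++ [List.replicate m.toNat true])
        (head.filter nz ++ active.drop m.toNat)

def get_scenarios_alt (book_nums : List Int) : List (List (List Bool)) :=
  (PySem.List.pyRange 1 ((book_nums.length : Int) + 1) 1).foldl
    (fun scenarios gs =>
      scenarios ++ [altLoop gs (pvFuel book_nums) [] (book_nums.filter nz)]) []

-- ===== PRECONDITION & SPEC =====
-- Pre_ excludes exactly the inputs with a negative count: there take() keeps finding the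
-- negative "book" forever and A's 'while True' never terminates (B's while-loop likewise).
def Pre_get_scenarios (book_nums : List Int) : Prop := ∀ b ∈ book_nums, 0 ≤ b
instance (book_nums : List Int) : Decidable (Pre_get_scenarios book_nums) := by
  unfold Pre_get_scenarios; infer_instance
def pvWitness_get_scenarios : List Int := [2, 1, 0, 3]

def Spec_get_scenarios (book_nums : List Int) (out : List (List (List Bool))) : Prop := out = get_scenarios_alt book_nums
instance (book_nums : List Int) (out : List (List (List Bool))) : Decidable (Spec_get_scenarios book_nums out) := by unfold Spec_get_scenarios; infer_instance

-- ===== CLAIM (what is proved, stated in full; the proofs are below) =====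
def Claim_equal_get_scenarios : Prop := ∀ (book_nums : List Int), Dom_get_scenarios book_nums → Pre_get_scenarios book_nums → Spec_get_scenarios book_nums (get_scenarios book_nums)

-- ===== LEMMAS AND PROOFS =====

-- One call of take: the group is [True]*min(n - len(lst), #nonzero), the nonzero residue of
-- the updated books is exactly B's one-round update of the compacted list, and nonnegativity
-- is preserved.
theorem takeAux_spec (n : Int) : ∀ (books : List Int) (lst : List Bool),
    (∀ b ∈ books, 0 ≤ b) → (lst.length : Int) ≤ n →
    (takeAux n lst books).1 =
      lst ++ List.replicate (min (n - lst.length) ((books.filter nz).length : Int)).toNat true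
    ∧ (takeAux n lst books).2.filter nz =
        (((books.filter nz).take
            (min (n - lst.length) ((books.filter nz).length : Int)).toNat).map (· - 1)).filter nz
          ++ (books.filter nz).drop
              (min (n - lst.length) ((books.filter nz).length : Int)).toNat
    ∧ ∀ b ∈ (takeAux n lst books).2, 0 ≤ b := by
  intro books
  induction books with
  | nil =>
    intro lst _ hle
    refine ⟨?_, by simp [takeAux], by simp [takeAux]⟩
    have h0 : (min (n - lst.length) ((([] : List Int).filter nz).length : Int)).toNat = 0 := by
      simp
    simp [takeAux]
  | cons b rest ih =>
    intro lst hnn hle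
    have hnr : ∀ x ∈ rest, 0 ≤ x := fun x hx => hnn x (List.mem_cons_of_mem _ hx)
    by_cases hbrk : (lst.length : Int) = n
    · have hm : (min (n - lst.length) ((((b :: rest)).filter nz).length : Int)).toNat = 0 := by
        omega
      simp only [takeAux, if_pos hbrk, hm]
      exact ⟨by simp, by simp, hnn⟩
    · by_cases hb0 : b = 0
      · obtain ⟨h1, h2, h3⟩ := ih lst hnr hle
        have hf : (b :: rest).filter nz = rest.filter nz := by simp [nz, hb0]
        simp only [takeAux, if_neg hbrk, if_pos hb0, hf]
        refine ⟨h1, ?_, ?_⟩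
        · have hf2 : (b :: (takeAux n lst rest).2).filter nz
              = (takeAux n lst rest).2.filter nz := by simp [nz, hb0]
          rw [hf2]; exact h2
        · intro x hx
          rcases List.mem_cons.mp hx with h | h
          · omega
          · exact h3 x h
      · have hlt : (lst.length : Int) < n := lt_of_le_of_ne hle hbrk
        obtain ⟨h1, h2, h3⟩ :=
          ih (lst ++ [true]) hnr (by simp; omega)
        have hf : ((b : Int) :: rest).filter nz = b :: rest.filter nz := by
          simp [nz, hb0]
        have hmin :
            (min (n - lst.length) (((rest.filter nz).length : Int) + 1)).toNat
              = (min (n - ((lst ++ [true]).length : Int)) ((rest.filter nz).length : Int)).toNat + 1 := by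
          simp only [List.length_append, List.length_cons, List.length_nil]
          omega
        simp only [takeAux, if_neg hbrk, if_neg hb0, hf]
        refine ⟨?_, ?_, ?_⟩
        · rw [h1]
          simp only [List.length_cons, Nat.cast_add, Nat.cast_one, hmin, List.replicate_succ]
          simp
        · have hfc : ((b - 1) :: (takeAux n (lst ++ [true]) rest).2).filter nz
              = (if nz (b - 1) then [b - 1] else []) ++ (takeAux n (lst ++ [true]) rest).2.filter nz := by
            by_cases hb1 : nz (b - 1) <;> simp [hb1]
          rw [hfc, h2]
          simp only [List.length_cons, Nat.cast_add, Nat.cast_one, hmin,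
            List.take_succ_cons, List.drop_succ_cons, List.map_cons, List.filter_cons]
          by_cases hb1 : nz (b - 1) <;> simp [hb1]
        · intro x hx
          rcases List.mem_cons.mp hx with h | h
          · have := hnn b List.mem_cons_self; omega
          · exact h3 x h

-- Lockstep equivalence of the two loops on the same fuel, with the invariant
-- active = books.filter nz.
theorem loop_eq (gs : Int) (hgs : 1 ≤ gs) : ∀ (fuel : Nat) (scenario : List (List Bool)) (books : List Int),
    (∀ b ∈ books, 0 ≤ b) →
    whileLoopA gs fuel scenario books = altLoop gs fuel scenario (books.filter nz) := by
  intro fuel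
  induction fuel with
  | zero => intro scenario books _; simp [whileLoopA, altLoop]
  | succ fuel ih =>
    intro scenario books hnn
    obtain ⟨h1, h2, h3⟩ := takeAux_spec gs books [] hnn (by simp; omega)
    simp only [List.length_nil, Nat.cast_zero, sub_zero, List.nil_append] at h1 h2
    by_cases hact : books.filter nz = []
    · have hm : (min gs (((books.filter nz).length : Int))).toNat = 0 := by
        rw [hact]; simp
      rw [hm] at h1
      simp only [List.replicate_zero] at h1
      simp [whileLoopA, altLoop, h1, hact]
    · have hlen : 1 ≤ (books.filter nz).length := List.length_pos_of_ne_nil hact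
      have hm1 : 1 ≤ (min gs (((books.filter nz).length : Int))).toNat := by omega
      have hne : (takeAux gs [] books).1 ≠ [] := by
        rw [h1]
        intro hc
        rw [List.replicate_eq_nil_iff] at hc
        omega
      simp only [whileLoopA, altLoop, if_neg hne, if_neg hact]
      rw [ih _ _ h3, h2, h1]

-- ===== VERDICT (by name: the statement is the Claim_ definition above) =====
theorem get_scenarios_spec : Claim_equal_get_scenarios := by
  intro book_nums _hdom hpre
  unfold Spec_get_scenarios get_scenarios get_scenarios_alt
  apply PySem.List.foldl_congr_mem'
  intro gs hgs acc
  have h1 : (1 : Int) ≤ gs := (PySem.List.mem_pyRange_one.mp hgs).1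
  rw [loop_eq gs h1 _ _ book_nums hpre]
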